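-- pv_equiv track=rewrite | github.com/sexualizer/test | DO_Python1/1/9(crypting).py | crypting
-- ===== SOURCE A (Python) =====
-- to = {"0": "@", "1": "!", "2": "#", "3": "$", "4": "%",
--     "5": "^", "6": "&", "7": "*", "8": "(", "9": ")"
-- }
--
-- def crypting(line):
--     res = ""
--     num = 0
--     for char in line:
--         num = ord(char)
--         for n in str(num):
--             res += to[n]
--     return res
-- ===== SOURCE B (Python) =====
-- _SYM = "@!#$%^&*()"
--
-- def _enc(n):
--     # encrypt one ordinal by arithmetic digit extraction (most significant via recursion)
--     s = _SYM[n % 10]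
--     return s if n < 10 else _enc(n // 10) + s
--
-- def crypting(line):
--     return "".join(_enc(ord(c)) for c in line)
-- ===== Notes on version B (the rewrite author's own statement) =====
-- stated objective: alternative
-- what changed: A converts each ordinal to a decimal string and loops over its characters substituting via a dict; B never produces digit characters at all: it extracts digits arithmetically by recursive divmod and indexes a symbol string directly, joining one encoded piece per input character.
import Mathlib
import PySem

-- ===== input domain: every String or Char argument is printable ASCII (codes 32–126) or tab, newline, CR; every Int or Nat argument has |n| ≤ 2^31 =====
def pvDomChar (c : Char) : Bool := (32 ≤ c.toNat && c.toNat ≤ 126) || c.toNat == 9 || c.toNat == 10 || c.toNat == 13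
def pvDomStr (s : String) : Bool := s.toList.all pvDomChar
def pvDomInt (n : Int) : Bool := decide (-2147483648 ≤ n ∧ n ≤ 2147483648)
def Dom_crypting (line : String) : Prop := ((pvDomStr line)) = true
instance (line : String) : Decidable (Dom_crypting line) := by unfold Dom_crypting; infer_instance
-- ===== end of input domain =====

-- B never forms digit characters: it extracts digits arithmetically by recursive divmod
-- and indexes a symbol string directly (one encoded piece per input character, joined),
-- instead of A's str(ord(c)) conversion walked char-by-char through a substitution dict.


-- ===== PORT A =====
-- the module-level dict 'to'
def cryptoMap : PySem.Dict Char String :=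
  ((((((((((PySem.Dict.empty.insert '0' "@").insert '1' "!").insert '2' "#").insert '3' "$").insert '4' "%").insert '5' "^").insert '6' "&").insert '7' "*").insert '8' "(").insert '9' ")")

-- 'to[n]' never misses: str(ord(char)) yields only decimal digits, so getD's default
-- is unreachable (proved below via toChars_digit_mem).
def crypting (line : String) : String :=
  line.toList.foldl (fun res c =>
    let num : Int := c.toNat
    (PySem.Int.toStr num).toList.foldl (fun r n => r ++ cryptoMap.getD n "") res) ""

-- ===== PORT B =====
-- _SYM[d] for 0 ≤ d ≤ 9 (index always in range, so the default is unreachable)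
def symD (d : Nat) : Char := "@!#$%^&*()".toList.getD d ' '

-- _enc: recursive arithmetic digit extraction, most significant digit via recursion
def encOrd (n : Nat) : String :=
  let s := String.ofList [symD (n % 10)]
  if _h : n < 10 then s else encOrd (n / 10) ++ s
decreasing_by exact Nat.div_lt_self (by omega) (by omega)

def crypting_alt (line : String) : String :=
  String.join (line.toList.map (fun c => encOrd c.toNat))

-- ===== PRECONDITION & SPEC =====
def Spec_crypting (line : String) (out : String) : Prop := out = crypting_alt line
instance (line : String) (out : String) : Decidable (Spec_crypting line out) := by unfold Spec_crypting; infer_instance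

-- ===== CLAIM =====
def Claim_equal_crypting : Prop := ∀ (line : String), Dom_crypting line → Spec_crypting line (crypting line)

-- ===== LEMMAS AND PROOFS =====

def digitChars : List Char := ['0','1','2','3','4','5','6','7','8','9']

lemma digitChar_mem (n : Nat) (h : n < 10) : Nat.digitChar n ∈ digitChars := by
  interval_cases n <;> decide

lemma toDigitsCore_digit_mem (f : Nat) : ∀ (n : Nat) (ds : List Char),
    (∀ c ∈ ds, c ∈ digitChars) → ∀ c ∈ Nat.toDigitsCore 10 f n ds, c ∈ digitChars := by
  induction f with
  | zero => intro n ds hds c hc; exact hds c hc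
  | succ f ih =>
    intro n ds hds c hc
    simp only [Nat.toDigitsCore] at hc
    by_cases h0 : n / 10 = 0
    · simp only [h0] at hc
      rcases List.mem_cons.mp hc with h | h
      · exact h ▸ digitChar_mem _ (Nat.mod_lt _ (by norm_num))
      · exact hds c h
    · simp only [if_neg h0] at hc
      refine ih (n / 10) _ ?_ c hc
      intro d hd
      rcases List.mem_cons.mp hd with h | h
      · exact h ▸ digitChar_mem _ (Nat.mod_lt _ (by norm_num))
      · exact hds d h

lemma toChars_digit_mem (m : Nat) : ∀ c ∈ PySem.Int.toChars (m : Int), c ∈ digitChars := by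
  intro c hc
  simp only [PySem.Int.toChars, Int.toNat_natCast] at hc
  rw [if_neg (by omega), Nat.toDigits] at hc
  exact toDigitsCore_digit_mem _ _ _ (by simp) c hc

def subChar (d : Char) : Char :=
  match d with
  | '0' => '@' | '1' => '!' | '2' => '#' | '3' => '$' | '4' => '%'
  | '5' => '^' | '6' => '&' | '7' => '*' | '8' => '(' | '9' => ')'
  | c => c

lemma getD_eq_subChar (d : Char) (hd : d ∈ digitChars) :
    cryptoMap.getD d "" = String.ofList [subChar d] := by
  fin_cases hd <;> decide

lemma inner_fold_eq (ds : List Char) (hds : ∀ c ∈ ds, c ∈ digitChars) :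
    ∀ (res : String),
      ds.foldl (fun r n => r ++ cryptoMap.getD n "") res =
        res ++ String.ofList (ds.map subChar) := by
  induction ds with
  | nil =>
    intro res
    apply String.toList_inj.mp
    simp [String.ofList_nil]
  | cons d ds ih =>
    intro res
    have hd : d ∈ digitChars := hds d List.mem_cons_self
    simp only [List.foldl_cons,
      ih (fun c hc => hds c (List.mem_cons_of_mem _ hc))]
    rw [getD_eq_subChar d hd]
    apply String.toList_inj.mp
    simp [String.toList_append, String.toList_ofList]

-- per-ordinal bridge: mapping A's digit characters through the table equals B's
-- arithmetic encoding; the domain gives n ≤ 126, so a finite case check suffices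
lemma map_subChar_eq_encOrd (n : Nat) (h : n ≤ 126) :
    String.ofList ((PySem.Int.toChars (n : Int)).map subChar) = encOrd n := by
  interval_cases n <;> (rw [encOrd]) <;> (try rw [encOrd]) <;> (try rw [encOrd]) <;> decide

lemma outer_fold_eq (cs : List Char) (hcs : ∀ c ∈ cs, pvDomChar c = true) : ∀ (res : String),
    cs.foldl (fun res c =>
      let num : Int := c.toNat
      (PySem.Int.toStr num).toList.foldl (fun r n => r ++ cryptoMap.getD n "") res) res =
    res ++ String.join (cs.map (fun c => encOrd c.toNat)) := by
  induction cs with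
  | nil =>
    intro res
    apply String.toList_inj.mp
    simp
  | cons c cs ih =>
    intro res
    simp only [List.foldl_cons]
    rw [inner_fold_eq _ (by
      intro d hd
      have : (PySem.Int.toStr (c.toNat : Int)).toList = PySem.Int.toChars (c.toNat : Int) :=
        PySem.Int.toList_toStr _
      exact toChars_digit_mem c.toNat d (this ▸ hd)),
      ih (fun d hd => hcs d (List.mem_cons_of_mem _ hd))]
    have hle : c.toNat ≤ 126 := by
      have := hcs c List.mem_cons_self
      simp [pvDomChar] at this
      omega
    rw [PySem.Int.toList_toStr, map_subChar_eq_encOrd c.toNat hle]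
    apply String.toList_inj.mp
    simp [String.toList_append]

-- ===== VERDICT =====
theorem crypting_spec : Claim_equal_crypting := by
  intro line hdom
  show crypting line = crypting_alt line
  unfold crypting crypting_alt
  have hcs : ∀ c ∈ line.toList, pvDomChar c = true := by
    simpa [Dom_crypting, pvDomStr, List.all_eq_true] using hdom
  rw [outer_fold_eq _ hcs]
  apply String.toList_inj.mp
  simp
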